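-- pv_equiv track=rewrite | github.com/Jashwanth-k/Leetcode | 2216-minimum-deletions-to-make-array-beautiful/2216-minimum-deletions-to-make-array-beautiful.py | minDeletion
-- ===== SOURCE A (Python) =====
-- from typing import List
--
-- def minDeletion(nums: List[int]) -> int:
--     n = len(nums)
--     delete = 0
--     i = 0
--     while i < n:
--         if (i - delete) % 2 == 0 and i + 1 < n and nums[i] == nums[i + 1]:
--             delete += 1
--         i += 1
--     if (n-delete) % 2 != 0:
--         delete += 1
--     return delete
-- ===== SOURCE B (Python) =====
-- from typing import List
--
-- def minDeletion(nums: List[int]) -> int: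
--     # Stage 1: run-length encode -- compress nums into maximal runs of equal values.
--     runs = []
--     for x in nums:
--         if runs and runs[-1][0] == x:
--             runs[-1][1] += 1
--         else:
--             runs.append([x, 1])
--     # Stage 2: fold over the runs. Inside a run no pair can be completed except the
--     # one element that closes a pair opened by the previous run, so a run of length L
--     # entered with an open pair contributes max(L-2, 0) deletions, otherwise L-1.
--     delete = 0
--     open_pair = False
--     for _, length in runs:
--         if open_pair:
--             length -= 1
--             open_pair = False
--         if length > 0:
--             delete += length - 1
--             open_pair = True
--     if open_pair:
--         delete += 1
--     return delete
-- ===== Notes on version B (the rewrite author's own statement) =====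
-- stated objective: alternative
-- what changed: Replaces A's single index-parity scan with a two-stage algorithm: first run-length encode nums into maximal runs of equal values, then fold over the runs, each run contributing length-1 deletions (length-2 if it closes an open pair), plus one deletion for a trailing open pair.
import Mathlib
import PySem

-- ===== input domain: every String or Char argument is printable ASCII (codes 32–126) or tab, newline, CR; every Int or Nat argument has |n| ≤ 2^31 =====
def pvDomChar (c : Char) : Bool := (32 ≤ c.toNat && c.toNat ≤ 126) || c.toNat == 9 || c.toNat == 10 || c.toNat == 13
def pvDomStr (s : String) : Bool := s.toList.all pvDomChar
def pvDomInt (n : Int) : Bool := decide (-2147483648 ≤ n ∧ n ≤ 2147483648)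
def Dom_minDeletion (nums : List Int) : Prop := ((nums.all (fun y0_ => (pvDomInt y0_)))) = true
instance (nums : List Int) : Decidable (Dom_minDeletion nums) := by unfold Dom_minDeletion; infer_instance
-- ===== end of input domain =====

-- B replaces A's single index-parity scan by a two-stage algorithm: run-length encode
-- nums into maximal runs of equal values, then fold over the runs (objective:
-- alternative; same O(n) cost).

-- ===== PORT A =====
-- A's while loop over index i, ported as structural recursion on the remaining suffix
-- carrying i and delete; 'i + 1 < n and nums[i] == nums[i+1]' is 'rest.head? = some x'.
def minDeletionLoopA : List Int → Int → Int → Int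
  | [], _, d => d
  | x :: rest, i, d =>
      minDeletionLoopA rest (i + 1)
        (if (i - d) % 2 = 0 ∧ rest.head? = some x then d + 1 else d)

def minDeletion (nums : List Int) : Int :=
  let n : Int := nums.length
  let d := minDeletionLoopA nums 0 0
  if (n - d) % 2 ≠ 0 then d + 1 else d

-- ===== PORT B =====
-- B stage 1: run-length encoding ('runs[-1][1] += 1' extends the last run in place,
-- ported as dropLast ++ [extended last run]).
def rleLoop : List (Int × Int) → List Int → List (Int × Int)
  | runs, [] => runs
  | runs, x :: rest =>
      rleLoop
        (match runs.getLast? with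
         | some (v, c) => if v = x then runs.dropLast ++ [(v, c + 1)] else runs ++ [(x, 1)]
         | none => [(x, 1)])
        rest

-- B stage 2: fold over the runs carrying (delete, open_pair); in the Python, after the
-- first 'if' open_pair is False, so the 'else' branch continues with open_pair = False.
def runFold : Int → Bool → List (Int × Int) → Int
  | d, op, [] => if op then d + 1 else d
  | d, op, (_, L) :: rest =>
      let L' := if op then L - 1 else L
      if L' > 0 then runFold (d + (L' - 1)) true rest
      else runFold d false rest

def minDeletion_alt (nums : List Int) : Int :=
  runFold 0 false (rleLoop [] nums)

-- ===== PRECONDITION & SPEC =====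
def Spec_minDeletion (nums : List Int) (out : Int) : Prop := out = minDeletion_alt nums
instance (nums : List Int) (out : Int) : Decidable (Spec_minDeletion nums out) := by unfold Spec_minDeletion; infer_instance

-- ===== CLAIM (what is proved, stated in full; the proofs are below) =====
def Claim_equal_minDeletion : Prop := ∀ (nums : List Int), Dom_minDeletion nums → Spec_minDeletion nums (minDeletion nums)

-- ===== LEMMAS AND PROOFS =====

-- flatten a run list back to the element list
def pvFlat (rs : List (Int × Int)) : List Int := rs.flatMap (fun p => List.replicate p.2.toNat p.1)

-- well-formed run list: adjacent values distinct, every count ≥ 1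
def pvWF (rs : List (Int × Int)) : Prop := (rs.map Prod.fst).IsChain (· ≠ ·) ∧ ∀ p ∈ rs, 1 ≤ p.2

theorem pvFlat_append (a b : List (Int × Int)) : pvFlat (a ++ b) = pvFlat a ++ pvFlat b := by
  simp [pvFlat]

-- one step of rleLoop: well-formedness is preserved and the flattening grows by [x]
theorem rle_step (runs : List (Int × Int)) (x : Int) (rest : List Int) (h : pvWF runs) :
    ∃ runs', rleLoop runs (x :: rest) = rleLoop runs' rest ∧
      pvWF runs' ∧ pvFlat runs' = pvFlat runs ++ [x] := by
  rcases List.eq_nil_or_concat runs with rfl | ⟨front, p, rfl⟩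
  · exact ⟨[(x, 1)], by simp [rleLoop], ⟨by simp, by simp⟩, by simp [pvFlat]⟩
  · obtain ⟨v, c⟩ := p
    simp only [List.concat_eq_append] at h ⊢
    have hlast : (front ++ [(v, c)]).getLast? = some (v, c) := by
      simp
    have hc1 : 1 ≤ c := h.2 (v, c) (by simp)
    by_cases hvx : v = x
    · subst hvx
      refine ⟨front ++ [(v, c + 1)], by simp [rleLoop, hlast], ⟨?_, ?_⟩, ?_⟩
      · have h1 := h.1
        simp only [List.map_append, List.map_cons, List.map_nil] at h1 ⊢
        exact h1
      · intro q hq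
        rcases List.mem_append.mp hq with hq | hq
        · exact h.2 q (List.mem_append.mpr (Or.inl hq))
        · simp at hq; subst hq; omega
      · rw [pvFlat_append, pvFlat_append]
        have hrep : (c + 1).toNat = c.toNat + 1 := by omega
        simp [pvFlat, hrep, List.replicate_succ']
    · refine ⟨(front ++ [(v, c)]) ++ [(x, 1)], by simp [rleLoop, hlast, hvx], ⟨?_, ?_⟩, ?_⟩
      · simp only [List.map_append, List.map_cons, List.map_nil]
        refine List.IsChain.append (by simpa using h.1) (List.IsChain.singleton x) ?_
        intro a ha b hb
        simp at ha hb
        subst hb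
        rw [show a = v by symm; simpa using ha]
        exact hvx
      · intro q hq
        rcases List.mem_append.mp hq with hq | hq
        · exact h.2 q hq
        · simp at hq; subst hq; omega
      · rw [pvFlat_append]; simp [pvFlat]

-- rleLoop preserves well-formedness and flattens back to the input
theorem rle_inv (l : List Int) : ∀ runs, pvWF runs →
    pvWF (rleLoop runs l) ∧ pvFlat (rleLoop runs l) = pvFlat runs ++ l := by
  induction l with
  | nil => intro runs h; exact ⟨by simpa [rleLoop] using h, by simp [rleLoop]⟩
  | cons x rest ih =>
    intro runs h
    obtain ⟨runs', heq, hwf', hfl⟩ := rle_step runs x rest h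
    obtain ⟨h1, h2⟩ := ih runs' hwf'
    exact ⟨by rwa [heq], by rw [heq, h2, hfl]; simp⟩

-- head of the flattening of the tail differs from the first run's value
theorem pvFlat_head_ne (v : Int) (c : Int) (rest : List (Int × Int))
    (h : pvWF ((v, c) :: rest)) : (pvFlat rest).head? ≠ some v := by
  cases rest with
  | nil => simp [pvFlat]
  | cons q rs =>
    obtain ⟨w, c₂⟩ := q
    have hne : v ≠ w := by
      have h1 := h.1
      simp only [List.map_cons] at h1
      exact List.rel_of_isChain_cons_cons h1
    have hc₂ : 1 ≤ c₂ := h.2 (w, c₂) (by simp)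
    obtain ⟨k, hk⟩ : ∃ k, c₂.toNat = k + 1 := ⟨c₂.toNat - 1, by omega⟩
    simp [pvFlat, hk, List.replicate_succ]
    exact fun hx => absurd hx.symm hne

theorem pvWF_tail (p : Int × Int) (rest : List (Int × Int)) (h : pvWF (p :: rest)) :
    pvWF rest := by
  refine ⟨?_, fun q hq => h.2 q (by simp [hq])⟩
  have h1 := h.1
  simp only [List.map_cons] at h1
  exact List.isChain_of_isChain_cons h1

-- A's final parity fix applied after running the loop on l from state (i, d)
def pvFin (l : List Int) (i d : Int) : Int :=
  let d' := minDeletionLoopA l i d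
  if (i + l.length - d') % 2 ≠ 0 then d' + 1 else d'

theorem pvFin_step (n : Nat) (v : Int) (t : List Int) (i d i₂ d₂ : Int)
    (hL : minDeletionLoopA (List.replicate n v ++ t) i d = minDeletionLoopA t i₂ d₂)
    (hi : i + n = i₂) :
    pvFin (List.replicate n v ++ t) i d = pvFin t i₂ d₂ := by
  simp only [pvFin, hL, List.length_append, List.length_replicate, Nat.cast_add]
  have e : i + ((n : Int) + t.length) = i₂ + t.length := by omega
  rw [e]

-- A's loop across one run entered at even kept parity: deletes n-1 elements, exits odd
theorem loopA_run_even (v : Int) : ∀ (n : Nat) (t : List Int) (i d : Int),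
    t.head? ≠ some v → 1 ≤ n → (i - d) % 2 = 0 →
    minDeletionLoopA (List.replicate n v ++ t) i d
      = minDeletionLoopA t (i + n) (d + n - 1) := by
  intro n
  induction n with
  | zero => intro t i d _ hn; omega
  | succ n ih =>
    intro t i d ht hn hpar
    rw [show List.replicate (n + 1) v ++ t = v :: (List.replicate n v ++ t) by
          simp [List.replicate_succ]]
    rw [show minDeletionLoopA (v :: (List.replicate n v ++ t)) i d
          = minDeletionLoopA (List.replicate n v ++ t) (i + 1)
              (if (i - d) % 2 = 0 ∧ (List.replicate n v ++ t).head? = some v then d + 1 else d)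
        from rfl]
    cases n with
    | zero =>
      rw [if_neg (by simpa using fun _ h => ht h)]
      simp only [List.replicate_zero, List.nil_append]
      congr 1 <;> push_cast <;> ring
    | succ n₀ =>
      have hhead : (List.replicate (n₀ + 1) v ++ t).head? = some v := by
        simp [List.replicate_succ]
      rw [if_pos ⟨hpar, hhead⟩]
      rw [ih t (i + 1) (d + 1) ht (by omega) (by omega)]
      congr 1 <;> push_cast <;> ring

-- A's loop across one run entered at odd kept parity: first element closes the pair
theorem loopA_run_odd (v : Int) (n : Nat) (t : List Int) (i d : Int)
    (ht : t.head? ≠ some v) (hn : 1 ≤ n) (hpar : (i - d) % 2 ≠ 0) :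
    minDeletionLoopA (List.replicate n v ++ t) i d
      = minDeletionLoopA t (i + n) (d + ((n - 2 : Nat) : Int)) := by
  obtain ⟨n₀, rfl⟩ : ∃ n₀, n = n₀ + 1 := ⟨n - 1, by omega⟩
  rw [show List.replicate (n₀ + 1) v ++ t = v :: (List.replicate n₀ v ++ t) by
        simp [List.replicate_succ]]
  rw [show minDeletionLoopA (v :: (List.replicate n₀ v ++ t)) i d
        = minDeletionLoopA (List.replicate n₀ v ++ t) (i + 1)
            (if (i - d) % 2 = 0 ∧ (List.replicate n₀ v ++ t).head? = some v then d + 1 else d)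
      from rfl]
  rw [if_neg (fun h => hpar h.1)]
  cases n₀ with
  | zero =>
    simp only [List.replicate_zero, List.nil_append]
    congr 1 <;> push_cast <;> omega
  | succ n₁ =>
    rw [loopA_run_even v (n₁ + 1) t (i + 1) d ht (by omega) (by omega)]
    congr 1 <;> push_cast <;> omega

-- main correspondence: B's fold over a well-formed run list equals A's loop over its
-- flattening followed by A's trailing parity fix
theorem key : ∀ (runs : List (Int × Int)), pvWF runs → ∀ (i d : Int) (op : Bool),
    ((i - d) % 2 = 0 ↔ op = false) →
    runFold d op runs = pvFin (pvFlat runs) i d := by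
  intro runs
  induction runs with
  | nil =>
    intro _ i d op hpar
    cases op <;> simp_all [runFold, pvFin, pvFlat, minDeletionLoopA]
  | cons p rest ih =>
    intro hwf i d op hpar
    obtain ⟨v, c⟩ := p
    have hc : 1 ≤ c := hwf.2 (v, c) (by simp)
    have hcn : 1 ≤ c.toNat := by omega
    have hcast : (c.toNat : Int) = c := by omega
    have hhd := pvFlat_head_ne v c rest hwf
    have hflat : pvFlat ((v, c) :: rest) = List.replicate c.toNat v ++ pvFlat rest := by
      simp [pvFlat]
    have htl := pvWF_tail (v, c) rest hwf
    rw [hflat]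
    cases op with
    | false =>
      have hpar0 : (i - d) % 2 = 0 := hpar.mpr rfl
      have hA := loopA_run_even v c.toNat (pvFlat rest) i d hhd hcn hpar0
      rw [hcast] at hA
      have e : d + c - 1 = d + (c - 1) := by ring
      rw [e] at hA
      rw [pvFin_step c.toNat v (pvFlat rest) i d (i + c) (d + (c - 1)) hA (by omega)]
      rw [← ih htl (i + c) (d + (c - 1)) true (iff_of_false (by omega) (by simp))]
      simp only [runFold]
      norm_num
      exact fun h => absurd h (by omega)
    | true =>
      have hpar1 : (i - d) % 2 ≠ 0 := by
        intro h; exact absurd (hpar.mp h) (by simp)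
      have hA := loopA_run_odd v c.toNat (pvFlat rest) i d hhd hcn hpar1
      rw [hcast] at hA
      by_cases hc2 : c - 1 > 0
      · have e : d + ((c.toNat - 2 : Nat) : Int) = d + (c - 1 - 1) := by omega
        rw [e] at hA
        rw [pvFin_step c.toNat v (pvFlat rest) i d (i + c) (d + (c - 1 - 1)) hA (by omega)]
        rw [← ih htl (i + c) (d + (c - 1 - 1)) true (iff_of_false (by omega) (by simp))]
        simp only [runFold]
        norm_num
        exact fun h => absurd h (by omega)
      · have hc1 : c = 1 := by omega
        subst hc1
        have e : d + ((Int.toNat 1 - 2 : Nat) : Int) = d := by norm_num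
        rw [e] at hA
        rw [pvFin_step (Int.toNat 1) v (pvFlat rest) i d (i + 1) d hA (by omega)]
        rw [← ih htl (i + 1) d false (iff_of_true (by omega) rfl)]
        simp only [runFold]
        norm_num

-- ===== VERDICT (by name: the statement is the Claim_ definition above) =====
theorem minDeletion_spec : Claim_equal_minDeletion := by
  intro nums _
  unfold Spec_minDeletion minDeletion minDeletion_alt
  have hwf0 : pvWF ([] : List (Int × Int)) := ⟨List.IsChain.nil, by simp⟩
  obtain ⟨hwf, hflat⟩ := rle_inv nums [] hwf0
  have hflat' : pvFlat (rleLoop [] nums) = nums := by simpa [pvFlat] using hflat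
  have h := key (rleLoop [] nums) hwf 0 0 false (by norm_num)
  rw [hflat'] at h
  rw [h]
  simp only [pvFin]
  norm_num
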